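-- pv_equiv track=rewrite | github.com/MattiaRigon/SIV_project | classification.py | trova_intervalli_non_consecutivi
-- ===== SOURCE A (Python) =====
-- def trova_intervalli_non_consecutivi(array):
--     intervals = []
--     start = array[0]
--     end = array[0]
--
--     for i in range(1, len(array)):
--         if array[i] - array[i - 1] != 1:
--             end = array[i - 1]
--             if start != end:
--                 intervals.append((start, end))
--             start = array[i]
--
--     if start != array[-1]:
--         intervals.append((start, array[-1]))
--
--     return intervals
-- ===== SOURCE B (Python) =====
-- def trova_intervalli_non_consecutivi(array):
--     n = len(array)
--     breaks = [0] + [i for i in range(1, n) if array[i] - array[i - 1] != 1] + [n]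
--     return [(array[s], array[e - 1])
--             for s, e in zip(breaks, breaks[1:])
--             if array[s] != array[e - 1]]
-- ===== Notes on version B (the rewrite author's own statement) =====
-- stated objective: alternative
-- what changed: B drops A's running start/end bookkeeping: it computes the list of break positions once (indices where the step is not +1) and reads each run's (first, last) pair directly off consecutive break positions, filtering out single-element runs.
import Mathlib
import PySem

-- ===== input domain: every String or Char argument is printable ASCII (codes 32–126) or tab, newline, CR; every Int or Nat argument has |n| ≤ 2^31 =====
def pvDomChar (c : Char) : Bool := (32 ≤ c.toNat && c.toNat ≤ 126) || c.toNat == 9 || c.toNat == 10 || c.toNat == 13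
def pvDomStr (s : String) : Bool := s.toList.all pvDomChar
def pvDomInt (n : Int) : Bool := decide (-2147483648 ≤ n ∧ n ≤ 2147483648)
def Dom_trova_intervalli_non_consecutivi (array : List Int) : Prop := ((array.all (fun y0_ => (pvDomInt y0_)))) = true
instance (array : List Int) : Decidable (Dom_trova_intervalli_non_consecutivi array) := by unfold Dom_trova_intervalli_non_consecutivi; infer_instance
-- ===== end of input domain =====

-- B replaces A's explicit start/end loop bookkeeping by computing the break positions once
-- and reading each run off the break list (objective: alternative decomposition, same cost).

-- ===== PORT A =====
-- A-side helper: the body of A's for-loop; state = (intervals, start, end)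
def pvStepA (array : List Int) (s : List (Int × Int) × Int × Int) (i : Int) :
    List (Int × Int) × Int × Int :=
  if PySem.List.pyGetD array i 0 - PySem.List.pyGetD array (i - 1) 0 ≠ 1 then
    ((if s.2.1 ≠ PySem.List.pyGetD array (i - 1) 0 then
        s.1 ++ [(s.2.1, PySem.List.pyGetD array (i - 1) 0)] else s.1),
     PySem.List.pyGetD array i 0, PySem.List.pyGetD array (i - 1) 0)
  else s

def trova_intervalli_non_consecutivi (array : List Int) : List (Int × Int) :=
  match PySem.List.pyGet? array 0 with
  | none => []  -- array[0] raises IndexError in Python; excluded by Pre_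
  | some a0 =>
    let st := (PySem.List.pyRange 1 (array.length : Int) 1).foldl (pvStepA array) ([], a0, a0)
    if st.2.1 ≠ PySem.List.pyGetD array (-1) 0 then
      st.1 ++ [(st.2.1, PySem.List.pyGetD array (-1) 0)]
    else st.1

-- ===== PORT B =====
-- B-side helper: the comprehension body — keep (array[s], array[e-1]) when they differ
def pvPairFn (array : List Int) (se : Int × Int) : Option (Int × Int) :=
  if PySem.List.pyGetD array se.1 0 ≠ PySem.List.pyGetD array (se.2 - 1) 0 then
    some (PySem.List.pyGetD array se.1 0, PySem.List.pyGetD array (se.2 - 1) 0)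
  else none

def trova_intervalli_non_consecutivi_alt (array : List Int) : List (Int × Int) :=
  let n : Int := (array.length : Int)
  let breaks : List Int :=
    [0] ++ (PySem.List.pyRange 1 n 1).filter
      (fun i => decide (PySem.List.pyGetD array i 0 - PySem.List.pyGetD array (i - 1) 0 ≠ 1))
      ++ [n]
  (breaks.zip breaks.tail).filterMap (pvPairFn array)

-- ===== PRECONDITION & SPEC =====
-- Pre_ excludes only the empty list, on which A raises IndexError (array[0]).
def Pre_trova_intervalli_non_consecutivi (array : List Int) : Prop := array ≠ []
instance (array : List Int) : Decidable (Pre_trova_intervalli_non_consecutivi array) := by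
  unfold Pre_trova_intervalli_non_consecutivi; infer_instance
def pvWitness_trova_intervalli_non_consecutivi : List Int := [1, 2, 5]

def Spec_trova_intervalli_non_consecutivi (array : List Int) (out : List (Int × Int)) : Prop := out = trova_intervalli_non_consecutivi_alt array
instance (array : List Int) (out : List (Int × Int)) : Decidable (Spec_trova_intervalli_non_consecutivi array out) := by unfold Spec_trova_intervalli_non_consecutivi; infer_instance

-- ===== CLAIM (what is proved, stated in full; the proofs are below) =====
def Claim_equal_trova_intervalli_non_consecutivi : Prop := ∀ (array : List Int), Dom_trova_intervalli_non_consecutivi array → Pre_trova_intervalli_non_consecutivi array → Spec_trova_intervalli_non_consecutivi array (trova_intervalli_non_consecutivi array)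

-- ===== LEMMAS AND PROOFS =====

-- break list of the prefix [0, m): 0 plus all break positions in range(1, m)
def pvBrks (a : List Int) (m : Int) : List Int :=
  0 :: (PySem.List.pyRange 1 m 1).filter
    (fun i => decide (PySem.List.pyGetD a i 0 - PySem.List.pyGetD a (i - 1) 0 ≠ 1))

def pvPairs (a : List Int) (bs : List Int) : List (Int × Int) :=
  (bs.zip bs.tail).filterMap (pvPairFn a)

lemma pvPairs_cons_cons (a : List Int) (b c : Int) (t : List Int) :
    pvPairs a (b :: c :: t) = (pvPairFn a (b, c)).toList ++ pvPairs a (c :: t) := by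
  cases h : pvPairFn a (b, c) <;> simp [pvPairs, h]

lemma pvPairs_append (a : List Int) (x : Int) :
    ∀ (bs : List Int), bs ≠ [] →
      pvPairs a (bs ++ [x]) = pvPairs a bs ++ (pvPairFn a (bs.getLastD 0, x)).toList := by
  intro bs
  induction bs with
  | nil => intro h; exact absurd rfl h
  | cons b t ih =>
    intro _
    cases t with
    | nil =>
      cases h : pvPairFn a (b, x) <;> simp [pvPairs, h]
    | cons c t' =>
      have h1 : (b :: c :: t') ++ [x] = b :: ((c :: t') ++ [x]) := rfl
      rw [h1, show (c :: t') ++ [x] = c :: (t' ++ [x]) from rfl, pvPairs_cons_cons,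
          show c :: (t' ++ [x]) = (c :: t') ++ [x] from rfl, ih (by simp), pvPairs_cons_cons]
      simp [List.getLastD]

-- the loop invariant: after processing range(1, m), the intervals are the pairs of the
-- break list of the prefix and start is the element at the last break
lemma pvFoldInv (a : List Int) (a0 : Int) (h0 : PySem.List.pyGet? a 0 = some a0) :
    ∀ (k : Nat), (1 + (k : Int)) ≤ (a.length : Int) → ∃ e,
      (PySem.List.pyRange 1 (1 + (k : Int)) 1).foldl (pvStepA a) ([], a0, a0)
        = (pvPairs a (pvBrks a (1 + (k : Int))),
           PySem.List.pyGetD a ((pvBrks a (1 + (k : Int))).getLastD 0) 0, e) := by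
  intro k
  induction k with
  | zero =>
    intro _
    refine ⟨a0, ?_⟩
    rw [PySem.List.pyRange_one_eq_nil (by norm_num)]
    simp [pvBrks, PySem.List.pyRange_one_eq_nil, pvPairs, PySem.List.pyGetD, h0]
  | succ k ih =>
    intro hle
    have hk : (1 + (k : Int)) ≤ (a.length : Int) := by push_cast at hle ⊢; omega
    obtain ⟨e, he⟩ := ih hk
    have hm : (1 : Int) ≤ 1 + (k : Int) := by omega
    have hr : PySem.List.pyRange 1 (1 + ((k + 1 : Nat) : Int)) 1
        = PySem.List.pyRange 1 (1 + (k : Int)) 1 ++ [1 + (k : Int)] := by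
      have : (1 : Int) + ((k + 1 : Nat) : Int) = (1 + (k : Int)) + 1 := by push_cast; ring
      rw [this, PySem.List.pyRange_one_succ_right hm]
    have hbr : pvBrks a (1 + ((k + 1 : Nat) : Int))
        = pvBrks a (1 + (k : Int)) ++
          (if PySem.List.pyGetD a (1 + (k : Int)) 0
              - PySem.List.pyGetD a ((1 + (k : Int)) - 1) 0 ≠ 1
           then [1 + (k : Int)] else []) := by
      have hsing : (List.filter
          (fun i => decide (PySem.List.pyGetD a i 0 - PySem.List.pyGetD a (i - 1) 0 ≠ 1))
          [1 + (k : Int)])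
          = if PySem.List.pyGetD a (1 + (k : Int)) 0
              - PySem.List.pyGetD a ((1 + (k : Int)) - 1) 0 ≠ 1
            then [1 + (k : Int)] else [] := by
        rw [List.filter_singleton]
        split_ifs with h1 <;> simp_all
      unfold pvBrks
      rw [hr, List.filter_append, hsing, List.cons_append]
    rw [hr, List.foldl_append, he]
    by_cases hc : PySem.List.pyGetD a (1 + (k : Int)) 0
        - PySem.List.pyGetD a ((1 + (k : Int)) - 1) 0 ≠ 1
    · refine ⟨PySem.List.pyGetD a ((1 + (k : Int)) - 1) 0, ?_⟩
      rw [hbr, if_pos hc]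
      have hne : pvBrks a (1 + (k : Int)) ≠ [] := by simp [pvBrks]
      rw [pvPairs_append a _ _ hne, List.getLastD_concat]
      simp only [List.foldl_cons, List.foldl_nil]
      unfold pvStepA
      rw [if_pos hc]
      by_cases hq : PySem.List.pyGetD a ((pvBrks a (1 + (k : Int))).getLastD 0) 0
          ≠ PySem.List.pyGetD a ((1 + (k : Int)) - 1) 0
      · rw [if_pos hq]
        unfold pvPairFn
        rw [if_pos hq]
        simp
      · rw [if_neg hq]
        unfold pvPairFn
        rw [if_neg hq]
        simp
    · refine ⟨e, ?_⟩
      rw [hbr, if_neg hc, List.append_nil]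
      simp only [List.foldl_cons, List.foldl_nil]
      unfold pvStepA
      rw [if_neg hc]

lemma pvPairFn_pos (a : List Int) (st en : Int)
    (h : PySem.List.pyGetD a st 0 ≠ PySem.List.pyGetD a (en - 1) 0) :
    pvPairFn a (st, en) = some (PySem.List.pyGetD a st 0, PySem.List.pyGetD a (en - 1) 0) := by
  unfold pvPairFn
  rw [if_pos h]

lemma pvPairFn_neg (a : List Int) (st en : Int)
    (h : ¬ PySem.List.pyGetD a st 0 ≠ PySem.List.pyGetD a (en - 1) 0) :
    pvPairFn a (st, en) = none := by
  unfold pvPairFn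
  rw [if_neg h]

lemma pvLastIdx (a : List Int) (h : a ≠ []) :
    PySem.List.pyGetD a (-1) 0 = PySem.List.pyGetD a ((a.length : Int) - 1) 0 := by
  have h1 : 1 ≤ a.length := List.length_pos_of_ne_nil h
  simp [PySem.List.pyGetD, PySem.List.pyGet?, PySem.List.pyIdx?, h1]

-- ===== VERDICT (by name: the statement is the Claim_ definition above) =====
theorem trova_intervalli_non_consecutivi_spec : Claim_equal_trova_intervalli_non_consecutivi := by
  intro array _ hpre
  unfold Spec_trova_intervalli_non_consecutivi
  have hlen : 1 ≤ array.length := List.length_pos_of_ne_nil hpre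
  obtain ⟨a0, h0⟩ : ∃ a0, PySem.List.pyGet? array 0 = some a0 := by
    cases array with
    | nil => exact absurd rfl hpre
    | cons x t => exact ⟨x, by simp [PySem.List.pyGet?, PySem.List.pyIdx?]⟩
  have hcast : (array.length : Int) = 1 + ((array.length - 1 : Nat) : Int) := by
    omega
  obtain ⟨e, he⟩ := pvFoldInv array a0 h0 (array.length - 1) (by omega)
  unfold trova_intervalli_non_consecutivi trova_intervalli_non_consecutivi_alt
  rw [h0]
  simp only []
  rw [hcast, he, pvLastIdx array hpre]
  have hbreaks : [(0 : Int)] ++ (PySem.List.pyRange 1 (1 + ((array.length - 1 : Nat) : Int)) 1).filter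
      (fun i => decide (PySem.List.pyGetD array i 0 - PySem.List.pyGetD array (i - 1) 0 ≠ 1))
      ++ [1 + ((array.length - 1 : Nat) : Int)]
      = (pvBrks array (1 + ((array.length - 1 : Nat) : Int)))
        ++ [1 + ((array.length - 1 : Nat) : Int)] := rfl
  rw [hbreaks]
  have hne : pvBrks array (1 + ((array.length - 1 : Nat) : Int)) ≠ [] := by simp [pvBrks]
  have hpa := pvPairs_append array (1 + ((array.length - 1 : Nat) : Int)) _ hne
  unfold pvPairs at hpa
  rw [hpa]
  have hidx : ((array.length : Int)) - 1 = (1 + ((array.length - 1 : Nat) : Int)) - 1 := by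
    rw [← hcast]
  rw [hidx]
  by_cases hq : PySem.List.pyGetD array
      ((pvBrks array (1 + ((array.length - 1 : Nat) : Int))).getLastD 0) 0
      ≠ PySem.List.pyGetD array ((1 + ((array.length - 1 : Nat) : Int)) - 1) 0
  · rw [if_pos hq, pvPairFn_pos array _ _ hq]
    simp [pvPairs]
  · rw [if_neg hq, pvPairFn_neg array _ _ hq]
    simp [pvPairs]
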